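-- pv_equiv track=rewrite | github.com/lenceai/projects | urlshortener/app/core/shortener.py | encode_base62
-- ===== SOURCE A (Python) =====
-- import string
--
-- ALPHABET = string.ascii_letters + string.digits
--
-- BASE = len(ALPHABET)
--
-- def encode_base62(num: int) -> str:
--     if num == 0:
--         return ALPHABET[0]
--
--     arr = []
--     while num:
--         num, rem = divmod(num, BASE)
--         arr.append(ALPHABET[rem])
--     arr.reverse()
--     return ''.join(arr)
-- ===== SOURCE B (Python) =====
-- import string
--
-- ALPHABET = string.ascii_letters + string.digits
--
-- BASE = len(ALPHABET)
--
-- def encode_base62(num: int) -> str: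
--     if num == 0:
--         return ALPHABET[0]
--     p = 1
--     while p * BASE <= num:
--         p *= BASE
--     out = ''
--     while p:
--         out += ALPHABET[num // p]
--         num %= p
--         p //= BASE
--     return out
-- ===== Notes on version B (the rewrite author's own statement) =====
-- stated objective: alternative
-- what changed: Replaces A's least-significant-first digit loop with list accumulation and reverse() by a most-significant-first algorithm: find the largest power of BASE not exceeding num, then peel digits left to right by dividing by decreasing powers, so no list and no reversal are needed.
import Mathlib
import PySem

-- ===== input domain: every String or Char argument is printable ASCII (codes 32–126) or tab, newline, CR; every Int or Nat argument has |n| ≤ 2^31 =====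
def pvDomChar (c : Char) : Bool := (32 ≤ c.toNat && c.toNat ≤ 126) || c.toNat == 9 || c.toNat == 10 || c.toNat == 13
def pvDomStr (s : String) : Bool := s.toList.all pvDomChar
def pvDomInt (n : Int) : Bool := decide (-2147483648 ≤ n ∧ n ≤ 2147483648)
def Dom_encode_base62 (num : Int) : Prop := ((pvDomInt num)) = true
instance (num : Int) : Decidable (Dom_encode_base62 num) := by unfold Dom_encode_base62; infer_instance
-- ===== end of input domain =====

-- B replaces A's LSB-first while-loop + list + reverse() by a most-significant-digit-first
-- algorithm: find the largest power of 62 not exceeding num, then peel digits left to right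
-- by division by decreasing powers (objective: alternative).

-- ALPHABET = string.ascii_letters + string.digits (shared module constant), BASE = 62
def pvAlphabet : List Char :=
  "abcdefghijklmnopqrstuvwxyzABCDEFGHIJKLMNOPQRSTUVWXYZ0123456789".toList

-- ===== PORT A =====
-- A's while-loop, fuel-bounded (fuel only makes the loop total; num.toNat + 1 suffices for num ≥ 0)
def encA_loop : Nat → Int → List Char → List Char
  | 0, _, arr => arr
  | fuel + 1, num, arr =>
    if num = 0 then arr
    else
      encA_loop fuel (PySem.Int.floordiv num 62)
        (arr ++ [pvAlphabet.getD (PySem.Int.mod num 62).toNat ' '])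

def encode_base62 (num : Int) : String :=
  if num = 0 then "a"
  else String.mk ((encA_loop (num.toNat + 1) num []).reverse)

-- ===== PORT B =====
-- B's first loop: p = 1; while p * BASE <= num: p *= BASE
def encB_pow : Nat → Int → Int → Int
  | 0, p, _ => p
  | fuel + 1, p, num => if p * 62 ≤ num then encB_pow fuel (p * 62) num else p

-- B's second loop: while p: out += ALPHABET[num // p]; num %= p; p //= BASE
def encB_emit : Nat → Int → Int → List Char → List Char
  | 0, _, _, out => out
  | fuel + 1, num, p, out =>
    if p = 0 then out
    else
      encB_emit fuel (PySem.Int.mod num p) (PySem.Int.floordiv p 62)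
        (out ++ [pvAlphabet.getD (PySem.Int.floordiv num p).toNat ' '])

def encode_base62_alt (num : Int) : String :=
  if num = 0 then "a"
  else String.mk (encB_emit (num.toNat + 1) num (encB_pow (num.toNat + 1) 1 num) [])

-- ===== PRECONDITION & SPEC =====
-- Pre_ excludes negative num, on which the Python A's while-loop never terminates (divmod floors, so num stays negative forever).
def Pre_encode_base62 (num : Int) : Prop := 0 ≤ num
instance (num : Int) : Decidable (Pre_encode_base62 num) := by unfold Pre_encode_base62; infer_instance
def pvWitness_encode_base62 : Int := (125)

def Spec_encode_base62 (num : Int) (out : String) : Prop := out = encode_base62_alt num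
instance (num : Int) (out : String) : Decidable (Spec_encode_base62 num out) := by unfold Spec_encode_base62; infer_instance

-- ===== CLAIM (what is proved, stated in full; the proofs are below) =====
def Claim_equal_encode_base62 : Prop := ∀ (num : Int), Dom_encode_base62 num → Pre_encode_base62 num → Spec_encode_base62 num (encode_base62 num)

-- ===== LEMMAS AND PROOFS =====

-- canonical base-62 digit string of a natural number, least-significant digit peeled last
def digN (n : Nat) : List Char :=
  if h : n = 0 then [] else digN (n / 62) ++ [pvAlphabet.getD (n % 62) ' ']
decreasing_by exact Nat.div_lt_self (Nat.pos_of_ne_zero h) (by norm_num)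

-- fixed-width (k+1 digits) base-62 digit string, most-significant digit first
def fixN : Nat → Nat → List Char
  | 0, n => [pvAlphabet.getD n ' ']
  | k + 1, n => pvAlphabet.getD (n / 62 ^ (k + 1)) ' ' :: fixN k (n % 62 ^ (k + 1))

theorem fixN_succ (k : Nat) (n : Nat) :
    fixN (k + 1) n = fixN k (n / 62) ++ [pvAlphabet.getD (n % 62) ' '] := by
  induction k generalizing n with
  | zero =>
    simp [fixN, Nat.pow_succ, Nat.pow_zero, Nat.one_mul, Nat.mod_mod_of_dvd n (by norm_num : (62:Nat) ∣ 62)]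
  | succ k ih =>
    have h1 : n / 62 ^ (k + 2) = n / 62 / 62 ^ (k + 1) := by
      rw [Nat.div_div_eq_div_mul]; ring_nf
    have h2 : n % 62 ^ (k + 2) % 62 = n % 62 := by
      exact Nat.mod_mod_of_dvd n (dvd_pow_self 62 (by omega))
    have h3 : n % 62 ^ (k + 2) / 62 = n / 62 % 62 ^ (k + 1) := by
      have := Nat.mod_mul_right_div_self n 62 (62 ^ (k + 1))
      rwa [← Nat.pow_succ'] at this
    calc fixN (k + 2) n
        = pvAlphabet.getD (n / 62 ^ (k + 2)) ' ' :: fixN (k + 1) (n % 62 ^ (k + 2)) := rfl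
      _ = pvAlphabet.getD (n / 62 ^ (k + 2)) ' ' ::
            (fixN k (n % 62 ^ (k + 2) / 62) ++ [pvAlphabet.getD (n % 62 ^ (k + 2) % 62) ' ']) := by
          rw [ih]
      _ = _ := by rw [h1, h2, h3]; rfl

-- when 62^k ≤ n < 62^(k+1), the fixed-width string has no leading zeros and equals digN n
theorem fixN_eq_digN (k : Nat) : ∀ n : Nat, 62 ^ k ≤ n → n < 62 ^ (k + 1) → fixN k n = digN n := by
  induction k with
  | zero =>
    intro n h1 h2
    have h2' : n < 62 := by simpa using h2
    have h1' : 1 ≤ n := by simpa using h1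
    have h0 : n ≠ 0 := by omega
    conv_rhs => rw [digN]
    rw [dif_neg h0, Nat.div_eq_of_lt h2', digN, dif_pos rfl, Nat.mod_eq_of_lt h2']
    simp [fixN]
  | succ k ih =>
    intro n h1 h2
    have hlo : 62 ^ k ≤ n / 62 := by
      rw [Nat.le_div_iff_mul_le (by norm_num)]
      calc 62 ^ k * 62 = 62 ^ (k + 1) := (Nat.pow_succ _ _).symm
        _ ≤ n := h1
    have hhi : n / 62 < 62 ^ (k + 1) := by
      rw [Nat.div_lt_iff_lt_mul (by norm_num)]
      calc n < 62 ^ (k + 2) := h2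
        _ = 62 ^ (k + 1) * 62 := Nat.pow_succ _ _
    have hn0 : n ≠ 0 := by
      have : 0 < 62 ^ (k + 1) := by positivity
      omega
    rw [fixN_succ, ih (n / 62) hlo hhi]
    conv_rhs => rw [digN]
    rw [dif_neg hn0]

-- A's loop produces digN of num, LSB-first (so reversed it is digN)
theorem encA_loop_eq (fuel : Nat) : ∀ (num : Int) (arr : List Char),
    0 ≤ num → num.toNat < fuel →
    (encA_loop fuel num arr).reverse = digN num.toNat ++ arr.reverse := by
  induction fuel with
  | zero => intro num arr _ h; omega
  | succ f ih =>
    intro num arr hnn hlt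
    by_cases h0 : num = 0
    · subst h0; simp [encA_loop, digN]
    · have hpos : 0 < num := lt_of_le_of_ne hnn (Ne.symm h0)
      obtain ⟨m, rfl⟩ := Int.eq_ofNat_of_zero_le hnn
      have hm0 : m ≠ 0 := by exact_mod_cast h0
      have hq : PySem.Int.floordiv (m : Int) 62 = ((m / 62 : Nat) : Int) := by
        exact_mod_cast PySem.Int.floordiv_natCast m 62
      have hr : PySem.Int.mod (m : Int) 62 = ((m % 62 : Nat) : Int) := by
        exact_mod_cast PySem.Int.mod_natCast m 62
      have hfq : ((m / 62 : Nat) : Int).toNat < f := by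
        simp only [Int.toNat_natCast]
        have : m / 62 < m := Nat.div_lt_self (Nat.pos_of_ne_zero hm0) (by norm_num)
        simp only [Int.toNat_natCast] at hlt; omega
      simp only [encA_loop, h0, if_false, hq, hr]
      rw [ih _ _ (by positivity) hfq]
      simp only [Int.toNat_natCast, List.reverse_append, List.reverse_cons, List.reverse_nil,
        List.nil_append, List.reverse_reverse]
      conv_rhs => rw [digN]
      rw [dif_neg hm0]
      simp

-- the pow loop returns the largest power of 62 between p and num
theorem encB_pow_spec (fuel : Nat) : ∀ (p num : Int), 0 < p → p ≤ num → num < p * 62 ^ fuel →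
    ∃ k : Nat, encB_pow fuel p num = p * 62 ^ k ∧ p * 62 ^ k ≤ num ∧ num < p * 62 ^ (k + 1) := by
  induction fuel with
  | zero =>
    intro p num hp hle hlt
    simp only [pow_zero, mul_one] at hlt; omega
  | succ f ih =>
    intro p num hp hle hlt
    by_cases h : p * 62 ≤ num
    · obtain ⟨k, hk1, hk2, hk3⟩ := ih (p * 62) num (by positivity) h
        (by rw [mul_assoc, ← pow_succ']; exact hlt)
      refine ⟨k + 1, ?_, ?_, ?_⟩
      · simp only [encB_pow, if_pos h, hk1, mul_assoc, ← pow_succ']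
      · rw [pow_succ', ← mul_assoc]; exact hk2
      · calc num < p * 62 * 62 ^ (k + 1) := hk3
          _ = p * 62 ^ (k + 2) := by rw [mul_assoc, ← pow_succ']
    · exact ⟨0, by simp [encB_pow, if_neg h], by simpa using hle, by simpa using lt_of_not_ge h⟩

theorem encB_emit_zero (fuel : Nat) (num : Int) (out : List Char) :
    encB_emit fuel num 0 out = out := by
  cases fuel <;> simp [encB_emit]

-- the emit loop starting at p = 62^k appends the fixed-width (k+1)-digit string
theorem encB_emit_eq (k : Nat) : ∀ (fuel : Nat) (num : Int) (out : List Char),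
    k < fuel → 0 ≤ num →
    encB_emit fuel num ((62 : Int) ^ k) out = out ++ fixN k num.toNat := by
  induction k with
  | zero =>
    intro fuel num out hf hnn
    obtain ⟨f, rfl⟩ : ∃ f, fuel = f + 1 := ⟨fuel - 1, by omega⟩
    obtain ⟨m, rfl⟩ := Int.eq_ofNat_of_zero_le hnn
    have hd : PySem.Int.floordiv ((m : Int)) 1 = ((m / 1 : Nat) : Int) := by
      exact_mod_cast PySem.Int.floordiv_natCast m 1
    have hm : PySem.Int.mod ((m : Int)) 1 = ((m % 1 : Nat) : Int) := by
      exact_mod_cast PySem.Int.mod_natCast m 1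
    have hp : PySem.Int.floordiv (1 : Int) 62 = ((1 / 62 : Nat) : Int) := by
      exact_mod_cast PySem.Int.floordiv_natCast 1 62
    simp only [pow_zero, encB_emit, if_neg (by norm_num : (1:Int) ≠ 0), hd, hm, hp]
    norm_num [encB_emit_zero, fixN]
  | succ k ih =>
    intro fuel num out hf hnn
    obtain ⟨f, rfl⟩ : ∃ f, fuel = f + 1 := ⟨fuel - 1, by omega⟩
    obtain ⟨m, rfl⟩ := Int.eq_ofNat_of_zero_le hnn
    have hpne : ((62 : Int) ^ (k + 1)) ≠ 0 := by positivity
    have hcast : ((62 : Int) ^ (k + 1)) = (((62 ^ (k + 1) : Nat)) : Int) := by push_cast; ring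
    have hd : PySem.Int.floordiv ((m : Int)) ((62 : Int) ^ (k + 1))
        = ((m / 62 ^ (k + 1) : Nat) : Int) := by
      rw [hcast]; exact_mod_cast PySem.Int.floordiv_natCast m (62 ^ (k + 1))
    have hm : PySem.Int.mod ((m : Int)) ((62 : Int) ^ (k + 1))
        = ((m % 62 ^ (k + 1) : Nat) : Int) := by
      rw [hcast]; exact_mod_cast PySem.Int.mod_natCast m (62 ^ (k + 1))
    have hp : PySem.Int.floordiv ((62 : Int) ^ (k + 1)) 62 = (62 : Int) ^ k := by
      rw [PySem.Int.floordiv_eq_ediv_of_pos (by norm_num)]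
      rw [pow_succ]
      exact Int.mul_ediv_cancel _ (by norm_num)
    simp only [encB_emit, if_neg hpne, hd, hm, hp]
    rw [ih f _ _ (by omega) (by positivity)]
    simp only [Int.toNat_natCast, fixN, List.append_assoc, List.singleton_append]

theorem encode_base62_spec : Claim_equal_encode_base62 := by
  intro num _ hpre
  unfold Spec_encode_base62 encode_base62 encode_base62_alt
  by_cases h0 : num = 0
  · simp [h0]
  · simp only [if_neg h0]
    have hpos : 0 < num := lt_of_le_of_ne hpre (Ne.symm h0)
    -- A side
    have hA := encA_loop_eq (num.toNat + 1) num [] hpre (by omega)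
    simp only [List.reverse_nil, List.append_nil] at hA
    rw [hA]
    -- B side: the pow loop
    have hnum_lt : num < 1 * 62 ^ (num.toNat + 1) := by
      have h1 : num.toNat < 62 ^ num.toNat := Nat.lt_pow_self (by norm_num)
      have h2 : (62 : Nat) ^ num.toNat ≤ 62 ^ (num.toNat + 1) :=
        Nat.pow_le_pow_right (by norm_num) (by omega)
      have : num.toNat < 62 ^ (num.toNat + 1) := lt_of_lt_of_le h1 h2
      have hc : (num.toNat : Int) < ((62 ^ (num.toNat + 1) : Nat) : Int) := by exact_mod_cast this
      rw [Int.toNat_of_nonneg hpre] at hc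
      push_cast at hc
      linarith
    obtain ⟨k, hk1, hk2, hk3⟩ := encB_pow_spec (num.toNat + 1) 1 num (by norm_num) hpos hnum_lt
    rw [one_mul] at hk1 hk2 hk3
    rw [hk1]
    -- emit fuel bound: k < num.toNat + 1
    have hkfuel : k < num.toNat + 1 := by
      have hkp : (k : Int) < 62 ^ k := by
        have : k < 62 ^ k := Nat.lt_pow_self (by norm_num)
        exact_mod_cast (by push_cast; exact_mod_cast this : (k : Int) < ((62 ^ k : Nat) : Int))
      have : (k : Int) ≤ num := le_trans (le_of_lt hkp) hk2
      omega
    rw [encB_emit_eq k (num.toNat + 1) num [] hkfuel hpre]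
    simp only [List.nil_append]
    -- fixed width = canonical since 62^k ≤ num.toNat < 62^(k+1)
    have hb1 : 62 ^ k ≤ num.toNat := by
      have : ((62 ^ k : Nat) : Int) ≤ num := by push_cast; linarith
      omega
    have hb2 : num.toNat < 62 ^ (k + 1) := by
      have : num < ((62 ^ (k + 1) : Nat) : Int) := by push_cast; linarith
      omega
    rw [fixN_eq_digN k num.toNat hb1 hb2]
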